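-- pv_equiv track=rewrite | github.com/divyesh27/temp | PythonPractice/src/FindSpecialCharRemoveChangeUpperNextChar.py | remove_special_char
-- ===== SOURCE A (Python) =====
-- def remove_special_char(input_val: str) -> str:
--     if input_val is None or len(input_val) == 0:
--         return input_val
--
--     flag = False
--     result = []
--
--     for c in input_val:
--         if not c.isalnum():  # Check if the character is not alphanumeric
--             flag = True
--         else:
--             if flag:
--                 result.append(c.upper())
--                 flag = False
--             else:
--                 result.append(c)
--
--     return ''.join(result)
-- ===== SOURCE B (Python) =====
-- def remove_special_char(input_val: str) -> str:
--     if input_val is None or len(input_val) == 0: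
--         return input_val
--
--     # Phase 1: split into maximal runs of characters with equal isalnum-ness.
--     runs = []
--     i, n = 0, len(input_val)
--     while i < n:
--         k = input_val[i].isalnum()
--         j = i
--         while j < n and input_val[j].isalnum() == k:
--             j += 1
--         runs.append((k, input_val[i:j]))
--         i = j
--
--     # Phase 2: non-alnum runs vanish and mark the next alnum run's head for upper-casing.
--     parts = []
--     flag = False
--     for is_alnum, run in runs:
--         if is_alnum:
--             parts.append(run[0].upper() + run[1:] if flag else run)
--             flag = False
--         else:
--             flag = True
--     return ''.join(parts)
-- ===== Notes on version B (the rewrite author's own statement) =====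
-- stated objective: alternative
-- what changed: B replaces A's per-character flag loop by a two-phase run decomposition: first split the string into maximal runs of equal isalnum-ness, then emit alnum runs whole (upper-casing the head of a run preceded by a non-alnum run) and drop non-alnum runs.
import Mathlib
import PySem

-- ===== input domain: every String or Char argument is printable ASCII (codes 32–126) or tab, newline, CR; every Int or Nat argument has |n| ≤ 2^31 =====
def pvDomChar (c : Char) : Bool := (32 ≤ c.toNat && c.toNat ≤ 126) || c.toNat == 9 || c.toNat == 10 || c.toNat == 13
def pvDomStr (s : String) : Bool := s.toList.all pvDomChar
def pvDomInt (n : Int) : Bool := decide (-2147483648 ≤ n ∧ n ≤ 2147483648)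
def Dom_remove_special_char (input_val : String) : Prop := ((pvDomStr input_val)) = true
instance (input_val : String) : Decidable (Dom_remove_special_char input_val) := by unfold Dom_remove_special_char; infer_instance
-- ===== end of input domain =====

-- B re-implements A by a two-phase run decomposition (split into maximal isalnum runs, then
-- process runs) instead of A's per-character flag loop; same O(n) cost (objective: alternative).

-- ===== PORT A =====
-- body of A's for-loop (flag, result accumulator)
def pvStepA (acc : Bool × List Char) (c : Char) : Bool × List Char :=
  if !(PySem.Chars.isalnum c) then (true, acc.2)
  else if acc.1 then (false, acc.2 ++ [PySem.Chars.upperChar c])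
  else (acc.1, acc.2 ++ [c])

def remove_special_char (input_val : String) : String :=
  if input_val.toList.length = 0 then input_val
  else
    let st := input_val.toList.foldl pvStepA (false, [])
    String.ofList st.2

-- ===== PORT B =====
-- phase 1 of Source B: maximal runs of equal isalnum-ness (inner while-loop = takeWhile/dropWhile)
def pvRuns : List Char → List (Bool × List Char)
  | [] => []
  | c :: cs =>
    let k := PySem.Chars.isalnum c
    (k, c :: cs.takeWhile (fun d => PySem.Chars.isalnum d == k)) ::
      pvRuns (cs.dropWhile (fun d => PySem.Chars.isalnum d == k))
termination_by cs => cs.length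
decreasing_by
  simpa using Nat.lt_succ_of_le (List.length_dropWhile_le _ _)

-- phase 2 of Source B: fold over the runs with the 'previous run was special' flag
def pvProcRuns : Bool → List (Bool × List Char) → List Char
  | _, [] => []
  | flag, (k, run) :: rs =>
    if k then
      (if flag then
        (match run with
         | [] => []
         | r :: rt => PySem.Chars.upperChar r :: rt)
       else run) ++ pvProcRuns false rs
    else pvProcRuns true rs

def remove_special_char_alt (input_val : String) : String :=
  if input_val.toList.length = 0 then input_val
  else String.ofList (pvProcRuns false (pvRuns input_val.toList))

-- ===== PRECONDITION & SPEC =====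
def Spec_remove_special_char (input_val : String) (out : String) : Prop := out = remove_special_char_alt input_val
instance (input_val : String) (out : String) : Decidable (Spec_remove_special_char input_val out) := by unfold Spec_remove_special_char; infer_instance

-- ===== CLAIM (what is proved, stated in full; the proofs are below) =====
def Claim_equal_remove_special_char : Prop := ∀ (input_val : String), Dom_remove_special_char input_val → Spec_remove_special_char input_val (remove_special_char input_val)

-- ===== LEMMAS AND PROOFS =====

-- character-level recursion both programs are shown equal to
def pvCharProc : Bool → List Char → List Char
  | _, [] => []
  | flag, c :: cs =>
    if PySem.Chars.isalnum c then
      (if flag then PySem.Chars.upperChar c else c) :: pvCharProc false cs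
    else pvCharProc true cs

lemma pvFoldA (cs : List Char) : ∀ (flag : Bool) (acc : List Char),
    (cs.foldl pvStepA (flag, acc)).2 = acc ++ pvCharProc flag cs := by
  induction cs with
  | nil => simp [pvCharProc]
  | cons c cs ih =>
    intro flag acc
    rw [List.foldl_cons]
    by_cases h : PySem.Chars.isalnum c = true
    · cases flag
      · have hs : pvStepA (false, acc) c = (false, acc ++ [c]) := by simp [pvStepA, h]
        rw [hs, ih]; simp [pvCharProc, h]
      · have hs : pvStepA (true, acc) c = (false, acc ++ [PySem.Chars.upperChar c]) := by
          simp [pvStepA, h]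
        rw [hs, ih]; simp [pvCharProc, h]
    · simp at h
      have hs : pvStepA (flag, acc) c = (true, acc) := by simp [pvStepA, h]
      rw [hs, ih]; simp [pvCharProc, h]

lemma pvCharProc_alnum_prefix (p rest : List Char) (hp : ∀ d ∈ p, PySem.Chars.isalnum d = true) :
    pvCharProc false (p ++ rest) = p ++ pvCharProc false rest := by
  induction p with
  | nil => simp
  | cons d p ih =>
    simp only [List.cons_append, pvCharProc, hp d (by simp)]
    simp [ih (fun e he => hp e (by simp [he]))]

lemma pvCharProc_special_prefix (p rest : List Char) (hp : ∀ d ∈ p, PySem.Chars.isalnum d = false) :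
    pvCharProc true (p ++ rest) = pvCharProc true rest := by
  induction p with
  | nil => rfl
  | cons d p ih =>
    simp only [List.cons_append, pvCharProc, hp d (by simp)]
    simp only [Bool.false_eq_true, if_false]
    exact ih (fun e he => hp e (by simp [he]))

lemma pvRuns_charProc (n : Nat) : ∀ (cs : List Char), cs.length ≤ n → ∀ (flag : Bool),
    pvProcRuns flag (pvRuns cs) = pvCharProc flag cs := by
  induction n with
  | zero =>
    intro cs hle flag
    have : cs = [] := List.eq_nil_of_length_eq_zero (Nat.le_zero.mp hle)
    subst this
    rw [pvRuns]; rfl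
  | succ n ih =>
    intro cs hle flag
    match cs with
    | [] => rw [pvRuns]; rfl
    | c :: cs =>
      rw [pvRuns]
      have hsplit : cs.takeWhile (fun d => PySem.Chars.isalnum d == PySem.Chars.isalnum c) ++
          cs.dropWhile (fun d => PySem.Chars.isalnum d == PySem.Chars.isalnum c) = cs :=
        List.takeWhile_append_dropWhile
      have hrest := ih (cs.dropWhile (fun d => PySem.Chars.isalnum d == PySem.Chars.isalnum c))
        (by
          have := List.length_dropWhile_le (fun d => PySem.Chars.isalnum d == PySem.Chars.isalnum c) cs
          simp at hle; omega)
      have htake : ∀ d ∈ cs.takeWhile (fun e => PySem.Chars.isalnum e == PySem.Chars.isalnum c),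
          PySem.Chars.isalnum d = PySem.Chars.isalnum c := by
        intro d hd
        simpa using List.mem_takeWhile_imp hd
      by_cases h : PySem.Chars.isalnum c = true
      · rw [h] at hsplit hrest htake ⊢
        simp only [pvProcRuns, if_true]
        have h1 : pvCharProc flag (c :: cs) =
            (if flag then PySem.Chars.upperChar c else c) :: pvCharProc false cs := by
          cases flag <;> simp [pvCharProc, h]
        have h2 : pvCharProc false cs =
            cs.takeWhile (fun d => PySem.Chars.isalnum d == true) ++
              pvCharProc false (cs.dropWhile (fun d => PySem.Chars.isalnum d == true)) := by
          conv_lhs => rw [← hsplit]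
          exact pvCharProc_alnum_prefix _ _ htake
        rw [hrest false, h1, h2]
        cases flag <;> simp
      · simp at h
        rw [h] at hsplit hrest htake ⊢
        simp only [pvProcRuns, Bool.false_eq_true, if_false]
        have h1 : pvCharProc flag (c :: cs) = pvCharProc true cs := by
          simp [pvCharProc, h]
        have h2 : pvCharProc true cs =
            pvCharProc true (cs.dropWhile (fun d => PySem.Chars.isalnum d == false)) := by
          conv_lhs => rw [← hsplit]
          exact pvCharProc_special_prefix _ _ htake
        rw [hrest true, h1, h2]

-- ===== VERDICT (by name: the statement is the Claim_ definition above) =====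
theorem remove_special_char_spec : Claim_equal_remove_special_char := by
  intro input_val _
  unfold Spec_remove_special_char remove_special_char remove_special_char_alt
  by_cases h : input_val.toList.length = 0
  · simp [h]
  · simp only [h, if_false]
    rw [pvRuns_charProc input_val.toList.length input_val.toList le_rfl false]
    rw [pvFoldA input_val.toList false []]
    simp
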